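-- pv_equiv track=rewrite | github.com/nvshah/problem-solving-cp | leetcode/streak/5 may 2022/34_max_num_of_ksum_pairs.py | a1
-- ===== SOURCE A (Python) =====
-- from collections import Counter
--
-- def a1(nums, k):
--     freqs = Counter(nums)
--     ans = 0
--     while freqs:
--         n1, f1 = freqs.popitem()  # pick any random number {n1}
--         n2 = k-n1                 # find corresp correct pair {n2}
--         if n2 == n1:
--             ans += f1 // 2        # if pair possess same num
--         else:
--             f2 = freqs.pop(n2, 0)
--             ans += min(f1, f2)    # register cnt of pair possible
--
--     return ans
-- ===== SOURCE B (Python) =====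
-- from collections import Counter
--
-- def a1(nums, k):
--     # Single non-mutating pass over the counter: each unordered pair {n, k-n}
--     # is counted once, at its smaller member (or as f//2 when n == k-n).
--     c = Counter(nums)
--     ans = 0
--     for n, f in c.items():
--         m = k - n
--         if n == m:
--             ans += f // 2
--         elif n < m:
--             ans += min(f, c.get(m, 0))
--     return ans
-- ===== Notes on version B (the rewrite author's own statement) =====
-- stated objective: simpler
-- what changed: A consumes a Counter destructively (while + popitem + pop, pairing entries by removal); B makes one non-mutating pass over the Counter, counting each unordered pair once at its smaller member (and f//2 for the self-paired k/2 value).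
import Mathlib
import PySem

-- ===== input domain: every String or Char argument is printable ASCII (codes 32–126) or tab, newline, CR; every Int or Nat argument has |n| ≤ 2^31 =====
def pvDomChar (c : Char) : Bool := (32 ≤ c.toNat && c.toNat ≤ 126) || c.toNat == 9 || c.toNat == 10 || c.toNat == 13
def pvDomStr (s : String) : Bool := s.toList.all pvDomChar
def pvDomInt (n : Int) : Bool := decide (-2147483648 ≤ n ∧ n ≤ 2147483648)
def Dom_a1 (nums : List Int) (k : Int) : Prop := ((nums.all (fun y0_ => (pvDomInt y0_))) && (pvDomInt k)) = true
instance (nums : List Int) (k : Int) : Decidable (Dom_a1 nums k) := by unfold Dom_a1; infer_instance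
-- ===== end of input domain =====

-- B replaces A's destructive popitem/pop loop over the counter by a single
-- non-mutating pass that counts each unordered pair once, at its smaller member.

-- ===== PORT A =====
lemma a1_dropLast_lt {α : Type} {l : List α} (h : l ≠ []) :
    l.dropLast.length < l.length := by
  have := List.length_pos_of_ne_nil h
  simp [List.length_dropLast]; omega

-- while freqs: n1, f1 = freqs.popitem(); …  (popitem = last inserted item; the
-- rest of the dict is its items without the last entry — ported by hand, exact
-- because dict entries keep insertion order).  f2 = freqs.pop(n2, 0) is the
-- non-raising pop: the stored value (default 0) plus removal of the entry,
-- ported as getD + erase.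
def a1Loop (k : Int) (d : PySem.Dict Int Int) (ans : Int) : Int :=
  match h : d.items.getLast? with
  | none => ans                                   -- while condition false
  | some (n1, f1) =>
    let d1 : PySem.Dict Int Int := PySem.Dict.mk d.items.dropLast
    let n2 := k - n1
    if n2 = n1 then
      a1Loop k d1 (ans + PySem.Int.floordiv f1 2)
    else
      let f2 := d1.getD n2 0
      a1Loop k (d1.erase n2) (ans + min f1 f2)
termination_by d.items.length
decreasing_by
  all_goals have hne : d.items ≠ [] := by intro hnil; rw [hnil] at h; simp at h
  · simpa [d1] using a1_dropLast_lt hne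
  · have h1 : ((PySem.Dict.mk d.items.dropLast).erase (k - n1)).items.length
        ≤ (PySem.Dict.mk d.items.dropLast).items.length := by
      exact List.length_filter_le _ _
    have h2 : (PySem.Dict.mk d.items.dropLast).items.length < d.items.length :=
      a1_dropLast_lt hne
    exact Nat.lt_of_le_of_lt h1 h2

def a1 (nums : List Int) (k : Int) : Int :=
  a1Loop k (PySem.Dict.counter nums) 0

-- ===== PORT B =====
def a1_alt (nums : List Int) (k : Int) : Int :=
  let c := PySem.Dict.counter nums
  c.items.foldl (fun ans nf =>
    let n := nf.1
    let f := nf.2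
    let m := k - n
    if n = m then ans + PySem.Int.floordiv f 2
    else if n < m then ans + min f (c.getD m 0)
    else ans) 0

-- ===== PRECONDITION & SPEC =====
def Spec_a1 (nums : List Int) (k : Int) (out : Int) : Prop := out = a1_alt nums k
instance (nums : List Int) (k : Int) (out : Int) : Decidable (Spec_a1 nums k out) := by unfold Spec_a1; infer_instance

-- ===== CLAIM (what is proved, stated in full; the proofs are below) =====
def Claim_equal_a1 : Prop := ∀ (nums : List Int) (k : Int), Dom_a1 nums k → Spec_a1 nums k (a1 nums k)

-- ===== LEMMAS AND PROOFS =====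

-- the per-entry contribution of B's pass, with lookups in dict c
def gterm (c : PySem.Dict Int Int) (k : Int) (nf : Int × Int) : Int :=
  if nf.1 = k - nf.1 then PySem.Int.floordiv nf.2 2
  else if nf.1 < k - nf.1 then min nf.2 (c.getD (k - nf.1) 0)
  else 0

lemma getD_mk_append_singleton (l : List (Int × Int)) (q : Int × Int) (x : Int)
    (hx : x ≠ q.1) (v : Int) :
    (PySem.Dict.mk (l ++ [q])).getD x v = (PySem.Dict.mk l).getD x v := by
  have hq : (q.1 == x) = false := by simpa using fun h => hx h.symm
  simp [PySem.Dict.getD, PySem.Dict.get?, List.find?_append, hq]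

lemma get?_mk_filter_ne (n2 x : Int) (hx : x ≠ n2) : ∀ l : List (Int × Int),
    (PySem.Dict.mk (List.filter (fun p => !p.1 == n2) l)).get? x
      = (PySem.Dict.mk l).get? x := by
  intro l
  induction l with
  | nil => rfl
  | cons p l ih =>
    obtain ⟨a, b⟩ := p
    by_cases hp : a = n2
    · have hax : (a == x) = false := by
        simp only [beq_eq_false_iff_ne]; rw [hp]; exact fun h => hx h.symm
      rw [List.filter_cons_of_neg (by simp [hp])]
      rw [PySem.Dict.get?_mk_cons, hax]
      simpa using ih
    · rw [List.filter_cons_of_pos (by simp [hp])]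
      rw [PySem.Dict.get?_mk_cons, PySem.Dict.get?_mk_cons]
      by_cases hax : a = x
      · simp [hax]
      · have : (a == x) = false := by simpa using hax
        simpa [this] using ih

lemma getD_mk_filter_ne (l : List (Int × Int)) (n2 x : Int) (hx : x ≠ n2) (v : Int) :
    (PySem.Dict.mk (List.filter (fun p => !p.1 == n2) l)).getD x v
      = (PySem.Dict.mk l).getD x v := by
  simp only [PySem.Dict.getD]
  rw [get?_mk_filter_ne n2 x hx l]

lemma getD_d_eq (d : PySem.Dict Int Int) (l : List (Int × Int)) (n1 f1 : Int)
    (hd : d.items = l ++ [(n1, f1)]) (x : Int) (hx : x ≠ n1) (v : Int) :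
    d.getD x v = (PySem.Dict.mk l).getD x v := by
  have hde : d = PySem.Dict.mk (l ++ [(n1, f1)]) := by
    cases d
    exact congrArg PySem.Dict.mk hd
  rw [hde]
  exact getD_mk_append_singleton l (n1, f1) x hx v

lemma gterm_congr (c c' : PySem.Dict Int Int) (k : Int) (l : List (Int × Int))
    (h : ∀ p ∈ l, p.1 < k - p.1 → c.getD (k - p.1) 0 = c'.getD (k - p.1) 0) :
    l.map (gterm c k) = l.map (gterm c' k) := by
  apply List.map_congr_left
  intro p hp
  unfold gterm
  split_ifs with h1 h2
  · rfl
  · rw [h p hp h2]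
  · rfl

lemma a1Loop_nil (k : Int) (d : PySem.Dict Int Int) (ans : Int) (h : d.items = []) :
    a1Loop k d ans = ans := by
  rw [a1Loop.eq_def]
  split
  · rfl
  · next heq => rw [h] at heq; simp at heq

lemma a1Loop_concat (k : Int) (l : List (Int × Int)) (n1 f1 : Int)
    (d : PySem.Dict Int Int) (hd : d.items = l ++ [(n1, f1)]) (ans : Int) :
    a1Loop k d ans =
      if k - n1 = n1 then
        a1Loop k (PySem.Dict.mk l) (ans + PySem.Int.floordiv f1 2)
      else
        a1Loop k ((PySem.Dict.mk l).erase (k - n1))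
          (ans + min f1 ((PySem.Dict.mk l).getD (k - n1) 0)) := by
  rw [a1Loop.eq_def]
  split
  · next heq => rw [hd] at heq; simp at heq
  · next n1' f1' heq =>
    rw [hd, List.getLast?_concat] at heq
    injection heq with h'
    injection h' with h1 h2
    subst h1; subst h2
    simp only [hd, List.dropLast_concat]

lemma loop_eq (k : Int) : ∀ (n : Nat) (d : PySem.Dict Int Int) (ans : Int),
    d.items.length = n →
    (d.items.map Prod.fst).Nodup →
    (∀ p ∈ d.items, 1 ≤ p.2) →
    a1Loop k d ans = ans + (d.items.map (gterm d k)).sum := by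
  intro n
  induction n using Nat.strong_induction_on with
  | _ n IH =>
  intro d ans hlen hnd hpos
  cases hlast : d.items.getLast? with
  | none =>
    have h0 : d.items = [] := List.getLast?_eq_none_iff.mp hlast
    rw [a1Loop_nil k d ans h0, h0]
    simp
  | some p =>
    obtain ⟨n1, f1⟩ := p
    have hne : d.items ≠ [] := by intro h0; rw [h0] at hlast; simp at hlast
    have hd : d.items = d.items.dropLast ++ [(n1, f1)] := by
      conv_lhs => rw [← List.dropLast_append_getLast hne]
      congr 1
      have h1 : d.items.getLast? = some (d.items.getLast hne) :=
        List.getLast?_eq_some_getLast hne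
      rw [hlast] at h1
      injection h1 with h1
      rw [h1]
    set l := d.items.dropLast with hldef
    have hmap : d.items.map Prod.fst = l.map Prod.fst ++ [n1] := by
      rw [hd]; simp
    have hnd0 : (l.map Prod.fst ++ [n1]).Nodup := by rw [← hmap]; exact hnd
    have hndl : (l.map Prod.fst).Nodup := hnd0.of_append_left
    have hmemn1 : n1 ∉ l.map Prod.fst := by
      have hdj := List.disjoint_of_nodup_append hnd0
      intro hm; exact hdj hm (by simp)
    have hn1l : ∀ p ∈ l, p.1 ≠ n1 := by
      intro p hp he
      exact hmemn1 (he ▸ List.mem_map_of_mem hp)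
    have hpos' : ∀ p ∈ l, (1 : Int) ≤ p.2 := by
      intro p hp; exact hpos p (by rw [hd]; exact List.mem_append_left _ hp)
    have hf1 : (1 : Int) ≤ f1 := hpos (n1, f1) (by rw [hd]; simp)
    have hlenl : l.length < n := by rw [← hlen, hd]; simp
    have hsum : (d.items.map (gterm d k)).sum
        = (l.map (gterm d k)).sum + gterm d k (n1, f1) := by
      rw [hd]; simp
    rw [a1Loop_concat k l n1 f1 d hd ans, hsum]
    by_cases hcase : k - n1 = n1
    · rw [if_pos hcase]
      rw [IH l.length hlenl (PySem.Dict.mk l) (ans + PySem.Int.floordiv f1 2) rfl hndl hpos']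
      have hcg : l.map (gterm (PySem.Dict.mk l) k) = l.map (gterm d k) := by
        apply gterm_congr
        intro p hp hlt
        have hx : k - p.1 ≠ n1 := by
          intro he
          exact hn1l p hp (by omega)
        rw [getD_d_eq d l n1 f1 hd _ hx]
      have hg1 : gterm d k (n1, f1) = PySem.Int.floordiv f1 2 := by
        simp only [gterm]
        rw [if_pos (show (n1 : Int) = k - n1 by omega)]
      rw [hcg, hg1]; ring
    · rw [if_neg hcase]
      have hkeysl : (PySem.Dict.mk l).keys = l.map Prod.fst := by
        simp [PySem.Dict.keys]
      have herase : (PySem.Dict.mk l).erase (k - n1)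
          = PySem.Dict.mk (List.filter (fun p => !p.1 == (k - n1)) l) := by
        simp [PySem.Dict.erase]
      by_cases hmem : k - n1 ∈ l.map Prod.fst
      · -- the complement is present: its whole count is popped
        obtain ⟨q, hq, hqf⟩ := List.mem_map.mp hmem
        obtain ⟨n2', f2⟩ := q
        have hqf' : n2' = k - n1 := hqf
        subst hqf'
        have hget : (PySem.Dict.mk l).get? (k - n1) = some f2 :=
          PySem.Dict.get?_of_mem_items _ hq (by rw [hkeysl]; exact hndl)
        have hgetD : (PySem.Dict.mk l).getD (k - n1) 0 = f2 := by
          simp [PySem.Dict.getD, hget]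
        obtain ⟨s, t, hst⟩ := List.append_of_mem hq
        have hmapl : l.map Prod.fst = s.map Prod.fst ++ (k - n1) :: t.map Prod.fst := by
          rw [hst]; simp
        have hndl' : (s.map Prod.fst ++ (k - n1) :: t.map Prod.fst).Nodup := by
          rw [← hmapl]; exact hndl
        have hks : (k - n1) ∉ s.map Prod.fst := by
          have hdj := List.disjoint_of_nodup_append hndl'
          intro hm; exact hdj hm (by simp)
        have hkt : (k - n1) ∉ t.map Prod.fst :=
          (List.nodup_cons.mp hndl'.of_append_right).1
        have hsts : ∀ p ∈ s ++ t, p.1 ≠ k - n1 := by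
          intro p hp he
          rcases List.mem_append.mp hp with h | h
          · exact hks (he ▸ List.mem_map_of_mem h)
          · exact hkt (he ▸ List.mem_map_of_mem h)
        have hfilter : List.filter (fun p => !p.1 == (k - n1)) l = s ++ t := by
          rw [hst, List.filter_append, List.filter_cons]
          have h1 : List.filter (fun p => !p.1 == (k - n1)) s = s :=
            List.filter_eq_self.mpr (fun p hp => by
              simpa using hsts p (List.mem_append_left _ hp))
          have h2 : List.filter (fun p => !p.1 == (k - n1)) t = t :=
            List.filter_eq_self.mpr (fun p hp => by
              simpa using hsts p (List.mem_append_right _ hp))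
          simp [h1, h2]
        rw [hgetD, herase, hfilter]
        have hlenst : (s ++ t).length < n := by
          have : (s ++ t).length ≤ l.length := by rw [hst]; simp
          omega
        have hsub : (s ++ t).Sublist l := by
          rw [hst]; exact List.Sublist.append_left (List.sublist_cons_self _ _) s
        have hndst : ((s ++ t).map Prod.fst).Nodup := hndl.sublist (hsub.map Prod.fst)
        have hposst : ∀ p ∈ s ++ t, (1 : Int) ≤ p.2 := fun p hp => hpos' p (hsub.mem hp)
        rw [IH (s ++ t).length hlenst (PySem.Dict.mk (s ++ t)) (ans + min f1 f2) rfl hndst hposst]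
        have hcg : (s ++ t).map (gterm (PySem.Dict.mk (s ++ t)) k)
            = (s ++ t).map (gterm d k) := by
          apply gterm_congr
          intro p hp hlt
          have hx1 : k - p.1 ≠ n1 := by
            intro he
            exact hsts p hp (by omega)
          have hx2 : k - p.1 ≠ k - n1 := by
            intro he
            exact hn1l p (hsub.mem hp) (by omega)
          rw [getD_d_eq d l n1 f1 hd _ hx1]
          rw [← hfilter, getD_mk_filter_ne l (k - n1) _ hx2]
        have hgd2 : d.getD (k - n1) 0 = f2 :=
          PySem.Dict.getD_of_mem_items d
            (by rw [hd]; exact List.mem_append_left _ hq)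
            (by simpa [PySem.Dict.keys] using hnd) 0
        have hgd1 : d.getD n1 0 = f1 :=
          PySem.Dict.getD_of_mem_items d (by rw [hd]; simp)
            (by simpa [PySem.Dict.keys] using hnd) 0
        have hg1 : gterm d k (n1, f1) = if n1 < k - n1 then min f1 f2 else 0 := by
          simp only [gterm]
          rw [if_neg (show ¬ (n1 : Int) = k - n1 by omega), hgd2]
        have hg2 : gterm d k (k - n1, f2) = if k - n1 < n1 then min f2 f1 else 0 := by
          simp only [gterm]
          have he : k - (k - n1) = n1 := by ring
          rw [if_neg (show ¬ (k - n1 : Int) = k - (k - n1) by omega), he, hgd1]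
        have hsum2 : (l.map (gterm d k)).sum
            = (s.map (gterm d k)).sum + gterm d k (k - n1, f2) + (t.map (gterm d k)).sum := by
          rw [hst]; simp; ring
        rw [hcg, List.map_append, List.sum_append, hsum2, hg1, hg2]
        have hor : n1 < k - n1 ∨ k - n1 < n1 := by omega
        rcases hor with h | h
        · rw [if_pos h, if_neg (show ¬ k - n1 < n1 by omega)]; ring
        · rw [if_neg (show ¬ n1 < k - n1 by omega), if_pos h, min_comm]; ring
      · -- the complement is absent: pop returns the default 0
        have hcontains : (PySem.Dict.mk l).getD (k - n1) 0 = 0 := by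
          apply PySem.Dict.getD_of_not_contains
          rw [PySem.Dict.contains_eq_decide_mem_keys, hkeysl]
          simpa using hmem
        have hfilter : List.filter (fun p => !p.1 == (k - n1)) l = l :=
          List.filter_eq_self.mpr (fun p hp => by
            have : p.1 ≠ k - n1 := fun he => hmem (he ▸ List.mem_map_of_mem hp)
            simpa using this)
        rw [hcontains, herase, hfilter]
        have hmin : min f1 (0 : Int) = 0 := min_eq_right (by omega)
        rw [IH l.length hlenl (PySem.Dict.mk l) (ans + min f1 0) rfl hndl hpos']
        have hcg : l.map (gterm (PySem.Dict.mk l) k) = l.map (gterm d k) := by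
          apply gterm_congr
          intro p hp hlt
          have hx : k - p.1 ≠ n1 := by
            intro he
            exact hmem (show k - n1 ∈ _ from (by omega : p.1 = k - n1) ▸ List.mem_map_of_mem hp)
          rw [getD_d_eq d l n1 f1 hd _ hx]
        have hgd2 : d.getD (k - n1) 0 = 0 := by
          apply PySem.Dict.getD_of_not_contains
          rw [PySem.Dict.contains_eq_decide_mem_keys]
          simp only [PySem.Dict.keys, hmap]
          simp only [decide_eq_false_iff_not]
          intro hmm
          rcases List.mem_append.mp hmm with h | h
          · exact hmem h
          · simp at h; omega
        have hg1 : gterm d k (n1, f1) = 0 := by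
          simp only [gterm]
          rw [if_neg (show ¬ (n1 : Int) = k - n1 by omega), hgd2]
          split_ifs with h
          · exact hmin
          · rfl
        rw [hcg, hg1, hmin]; ring

-- ===== VERDICT (by name: the statement is the Claim_ definition above) =====
theorem a1_spec : Claim_equal_a1 := by
  intro nums k _
  unfold Spec_a1
  have hnd : ((PySem.Dict.counter nums : PySem.Dict Int Int).items.map Prod.fst).Nodup := by
    have := PySem.Dict.nodup_keys_counter nums
    simpa [PySem.Dict.keys] using this
  have hpos : ∀ p ∈ (PySem.Dict.counter nums : PySem.Dict Int Int).items, (1 : Int) ≤ p.2 := by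
    intro p hp
    rw [PySem.Dict.items_counter] at hp
    obtain ⟨x, hx, rfl⟩ := List.mem_map.mp hp
    have hxm : x ∈ nums := (PySem.Set.mem_ofList nums x).mp hx
    have hc : 0 < nums.count x := List.count_pos_iff.mpr hxm
    show (1 : Int) ≤ (nums.count x : Int)
    exact_mod_cast hc
  have hA : a1 nums k = 0 + ((PySem.Dict.counter nums).items.map
      (gterm (PySem.Dict.counter nums) k)).sum :=
    loop_eq k (PySem.Dict.counter nums).items.length (PySem.Dict.counter nums) 0 rfl hnd hpos
  have hB : a1_alt nums k = 0 + ((PySem.Dict.counter nums).items.map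
      (gterm (PySem.Dict.counter nums) k)).sum := by
    show (PySem.Dict.counter nums : PySem.Dict Int Int).items.foldl
      (fun ans nf =>
        if nf.1 = k - nf.1 then ans + PySem.Int.floordiv nf.2 2
        else if nf.1 < k - nf.1 then
          ans + min nf.2 ((PySem.Dict.counter nums).getD (k - nf.1) 0)
        else ans) 0 = _
    have hfun : (fun (ans : Int) (nf : Int × Int) =>
        if nf.1 = k - nf.1 then ans + PySem.Int.floordiv nf.2 2
        else if nf.1 < k - nf.1 then
          ans + min nf.2 ((PySem.Dict.counter nums).getD (k - nf.1) 0)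
        else ans)
        = fun ans nf => ans + gterm (PySem.Dict.counter nums) k nf := by
      funext ans nf; unfold gterm; split_ifs <;> ring
    rw [hfun, PySem.List.foldl_add]
  rw [hA, hB]
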